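-- pv_equiv track=rewrite | github.com/ZiChuanLan/PDF2PPT-cloud-test | api/app/convert/pptx/font_utils.py | _tokenize_for_wrap
-- ===== SOURCE A (Python) =====
-- def _contains_cjk(text: str) -> bool:
--     for ch in text or "":
--         code = ord(ch)
--         if (
--             0x4E00 <= code <= 0x9FFF  # CJK Unified Ideographs
--             or 0x3400 <= code <= 0x4DBF  # CJK Unified Ideographs Extension A
--             or 0x3040 <= code <= 0x30FF  # Hiragana + Katakana
--             or 0xAC00 <= code <= 0xD7AF  # Hangul Syllables
--         ):
--             return True
--     return False
--
-- def _tokenize_for_wrap(para: str) -> list[str]: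
--     if not para:
--         return []
--
--     if (not _contains_cjk(para)) and (" " in para):
--         tokens: list[str] = []
--         parts = [p for p in para.split(" ") if p != ""]
--         for i, part in enumerate(parts):
--             if i > 0:
--                 tokens.append(" ")
--             tokens.append(part)
--         return tokens
--
--     # Mixed CJK/ASCII text needs token-level grouping for contiguous ASCII runs
--     # (e.g. "API", "HTTP", "A/B") so line-wrap does not split them into
--     # awkward fragments like "AP" + "I".
--     def _is_ascii_word_char(ch: str) -> bool:
--         return bool(ch) and ch.isascii() and (ch.isalnum() or ch in "_-./:+#%&@")
--
--     out: list[str] = []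
--     i = 0
--     n = len(para)
--     while i < n:
--         ch = para[i]
--         if ch.isspace():
--             if not out or out[-1] != " ":
--                 out.append(" ")
--             i += 1
--             continue
--         if _is_ascii_word_char(ch):
--             j = i + 1
--             while j < n and _is_ascii_word_char(para[j]):
--                 j += 1
--             out.append(para[i:j])
--             i = j
--             continue
--         out.append(ch)
--         i += 1
--
--     return out
-- ===== SOURCE B (Python) =====
-- def _contains_cjk(text: str) -> bool:
--     for ch in text or "":
--         code = ord(ch)
--         if (0x4E00 <= code <= 0x9FFF or 0x3400 <= code <= 0x4DBF
--                 or 0x3040 <= code <= 0x30FF or 0xAC00 <= code <= 0xD7AF):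
--             return True
--     return False
--
--
-- def _is_ascii_word_char(ch: str) -> bool:
--     return bool(ch) and ch.isascii() and (ch.isalnum() or ch in "_-./:+#%&@")
--
--
-- def _key(ch: str) -> str:
--     if ch.isspace():
--         return "ws"
--     if _is_ascii_word_char(ch):
--         return "word"
--     return "other"
--
--
-- def _tokenize_for_wrap(para: str) -> list[str]:
--     if not para:
--         return []
--
--     if (not _contains_cjk(para)) and (" " in para):
--         words = [p for p in para.split(" ") if p]
--         return words[:1] + [t for w in words[1:] for t in (" ", w)]
--
--     # Group the paragraph into maximal runs of one character class, then emit
--     # one token per whitespace run, one token per ASCII-word run, and one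
--     # token per character of any other run.
--     out: list[str] = []
--     rest = para
--     while rest:
--         k = _key(rest[0])
--         n = 1
--         while n < len(rest) and _key(rest[n]) == k:
--             n += 1
--         group, rest = rest[:n], rest[n:]
--         if k == "ws":
--             out.append(" ")
--         elif k == "word":
--             out.append(group)
--         else:
--             out.extend(group)
--     return out
-- ===== Notes on version B (the rewrite author's own statement) =====
-- stated objective: simpler
-- what changed: The mixed branch's index/while scan with out[-1] whitespace-collapse bookkeeping is replaced by a uniform classify-then-group pass (one maximal run of one character class per step, one emit rule per class), and the space-split branch's enumerate loop by slicing words[:1] + interleaved comprehension.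
import Mathlib
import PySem

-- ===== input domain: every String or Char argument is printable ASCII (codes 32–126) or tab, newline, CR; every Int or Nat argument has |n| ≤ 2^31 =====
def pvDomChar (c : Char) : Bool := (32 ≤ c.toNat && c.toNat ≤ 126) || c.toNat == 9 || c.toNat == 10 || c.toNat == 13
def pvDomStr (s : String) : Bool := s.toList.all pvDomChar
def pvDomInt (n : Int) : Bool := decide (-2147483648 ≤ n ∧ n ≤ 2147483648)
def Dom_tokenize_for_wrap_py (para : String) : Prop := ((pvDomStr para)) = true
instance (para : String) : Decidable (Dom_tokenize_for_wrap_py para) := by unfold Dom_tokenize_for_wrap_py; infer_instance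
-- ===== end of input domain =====

-- B replaces A's mixed-branch index/while scan (with out[-1] whitespace-collapse bookkeeping)
-- by a uniform classify-then-group pass, and the space-split branch's enumerate loop by
-- slicing plus an interleaving comprehension; objective: simpler, same O(n) cost.
set_option maxHeartbeats 2000000


-- ===== PORT A =====
-- shared module helper `_contains_cjk` (the early-return for-loop is List.any)
def pv_contains_cjk (text : String) : Bool :=
  text.toList.any (fun ch =>
    (0x4E00 ≤ ch.toNat && ch.toNat ≤ 0x9FFF) ||
    (0x3400 ≤ ch.toNat && ch.toNat ≤ 0x4DBF) ||
    (0x3040 ≤ ch.toNat && ch.toNat ≤ 0x30FF) ||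
    (0xAC00 ≤ ch.toNat && ch.toNat ≤ 0xD7AF))

-- shared helper `_is_ascii_word_char`; ch.isascii() is code ≤ 127 (exact)
def pvIsAsciiWord (ch : Char) : Bool :=
  decide (ch.toNat ≤ 127) && (PySem.Chars.isalnum ch || ch ∈ "_-./:+#%&@".toList)

-- A's mixed-branch while loop, one recursion step per Python iteration
-- (the inner `while j < n and _is_ascii_word_char(para[j])` scan is takeWhile/dropWhile)
def pvLoopA : List Char → List String → List String
  | [], out => out
  | c :: rest, out =>
    if PySem.Chars.isspace c then
      pvLoopA rest (if out = [] ∨ out.getLast? ≠ some " " then out ++ [" "] else out)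
    else if pvIsAsciiWord c then
      pvLoopA (rest.dropWhile pvIsAsciiWord) (out ++ [String.ofList (c :: rest.takeWhile pvIsAsciiWord)])
    else
      pvLoopA rest (out ++ [String.ofList [c]])
  termination_by cs _ => cs.length
  decreasing_by
  · simp
  · have := List.length_dropWhile_le (p := pvIsAsciiWord) (l := rest); simp; omega
  · simp

def tokenize_for_wrap_py (para : String) : List String :=
  let cs := para.toList
  if cs.isEmpty then []
  else if !pv_contains_cjk para && PySem.Chars.isIn [' '] cs then
    let parts := (PySem.Chars.splitOn cs [' ']).filter (fun p => decide (p ≠ []))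
    (PySem.List.enumerate parts 0).foldl
      (fun toks ip => (if 0 < ip.1 then toks ++ [" "] else toks) ++ [String.ofList ip.2]) []
  else
    pvLoopA cs []

-- ===== PORT B =====
-- `_key`: 'ws' ↦ 0, 'word' ↦ 1, 'other' ↦ 2
def pvKey (ch : Char) : Nat :=
  if PySem.Chars.isspace ch then 0 else if pvIsAsciiWord ch then 1 else 2

-- B's group loop: one step per maximal run of one character class
def pvTokB : List Char → List String
  | [] => []
  | c :: cs =>
    (if pvKey c = 0 then [" "]
     else if pvKey c = 1 then [String.ofList (c :: cs.takeWhile (fun d => pvKey d == pvKey c))]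
     else (c :: cs.takeWhile (fun d => pvKey d == pvKey c)).map (fun d => String.ofList [d]))
      ++ pvTokB (cs.dropWhile (fun d => pvKey d == pvKey c))
  termination_by cs => cs.length
  decreasing_by
  · have := List.length_dropWhile_le (p := fun d => pvKey d == pvKey c) (l := cs); simp; omega

def tokenize_for_wrap_py_alt (para : String) : List String :=
  let cs := para.toList
  if cs.isEmpty then []
  else if !pv_contains_cjk para && PySem.Chars.isIn [' '] cs then
    let words := (PySem.Chars.splitOn cs [' ']).filter (fun p => !p.isEmpty)
    (words.take 1).map String.ofList ++ (words.drop 1).flatMap (fun w => [" ", String.ofList w])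
  else
    pvTokB cs

-- ===== PRECONDITION & SPEC =====
def Spec_tokenize_for_wrap_py (para : String) (out : List String) : Prop := out = tokenize_for_wrap_py_alt para
instance (para : String) (out : List String) : Decidable (Spec_tokenize_for_wrap_py para out) := by unfold Spec_tokenize_for_wrap_py; infer_instance

-- ===== CLAIM (what is proved, stated in full; the proofs are below) =====
def Claim_equal_tokenize_for_wrap_py : Prop := ∀ (para : String), Dom_tokenize_for_wrap_py para → Spec_tokenize_for_wrap_py para (tokenize_for_wrap_py para)

-- ===== LEMMAS AND PROOFS =====

-- an ASCII word character is never whitespace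
theorem pvIsAsciiWord_not_space (c : Char) (h : pvIsAsciiWord c = true) :
    PySem.Chars.isspace c = false := by
  unfold pvIsAsciiWord at h
  simp only [Bool.and_eq_true, decide_eq_true_eq] at h
  obtain ⟨h1, h2⟩ := h
  simp [PySem.Chars.isalnum, PySem.Chars.isspace, PySem.Chars.isalpha, PySem.Chars.isdigit,
        PySem.Chars.isupper, PySem.Chars.islower, List.mem_cons, Char.ext_iff,
        Char.le_def, UInt32.le_iff_toNat_le] at *
  rcases h2 with h | h
  · omega
  · have hv : c.toNat = c.val.toNat := rfl
    rcases h with h|h|h|h|h|h|h|h|h|h <;> rw [h] at hv <;> simp at hv <;> omega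

theorem pvKey_eq_zero (d : Char) : (pvKey d == 0) = PySem.Chars.isspace d := by
  unfold pvKey
  split_ifs with h1 h2
  · simp [h1]
  · simp [pvIsAsciiWord_not_space d h2]
  · simp only [Bool.not_eq_true] at h1
    simp [h1]

theorem pvKey_eq_one (d : Char) : (pvKey d == 1) = pvIsAsciiWord d := by
  unfold pvKey
  split_ifs with h1 h2
  · cases hw : pvIsAsciiWord d
    · simp
    · exact absurd h1 (by simp [pvIsAsciiWord_not_space d hw])
  · simp [h2]
  · simp only [Bool.not_eq_true] at h2
    simp [h2]

theorem pv_head_dropWhile (p : Char → Bool) : ∀ (l : List Char) (c : Char),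
    ((l.dropWhile p).head? = some c) → p c = false := by
  intro l
  induction l with
  | nil => simp
  | cons a l ih =>
    intro c h
    by_cases ha : p a = true
    · rw [List.dropWhile_cons_of_pos ha] at h
      exact ih c h
    · simp only [List.dropWhile_cons, ha] at h
      simp at h ha
      exact h ▸ ha

theorem pvTokB_ws {c : Char} (h : PySem.Chars.isspace c = true) (cs : List Char) :
    pvTokB (c :: cs) = " " :: pvTokB (cs.dropWhile PySem.Chars.isspace) := by
  have hk : pvKey c = 0 := by unfold pvKey; simp [h]
  have hp : (fun d => pvKey d == pvKey c) = PySem.Chars.isspace := by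
    funext d; rw [hk]; exact pvKey_eq_zero d
  rw [pvTokB, hp, hk]
  simp

theorem pvTokB_word {c : Char} (h : pvIsAsciiWord c = true) (cs : List Char) :
    pvTokB (c :: cs) =
      String.ofList (c :: cs.takeWhile pvIsAsciiWord) :: pvTokB (cs.dropWhile pvIsAsciiWord) := by
  have hk : pvKey c = 1 := by unfold pvKey; simp [h, pvIsAsciiWord_not_space c h]
  have hp : (fun d => pvKey d == pvKey c) = pvIsAsciiWord := by
    funext d; rw [hk]; exact pvKey_eq_one d
  rw [pvTokB, hp, hk]
  simp

theorem pvTokB_other {c : Char} (h1 : PySem.Chars.isspace c = false)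
    (h2 : pvIsAsciiWord c = false) (cs : List Char) :
    pvTokB (c :: cs) = String.ofList [c] :: pvTokB cs := by
  have hk : pvKey c = 2 := by unfold pvKey; simp [h1, h2]
  rw [pvTokB, hk]
  simp only [show (2 : Nat) ≠ 0 by decide, show (2 : Nat) ≠ 1 by decide, if_false,
             List.map_cons, List.cons_append]
  congr 1
  cases cs with
  | nil => simp [pvTokB]
  | cons d cs' =>
    by_cases hd : pvKey d = 2
    · rw [List.takeWhile_cons, List.dropWhile_cons]
      simp only [hd, beq_self_eq_true, if_true]
      rw [pvTokB, hd]
      simp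
    · rw [List.takeWhile_cons, List.dropWhile_cons]
      simp [hd]

theorem pvLoopA_skip (cs : List Char) (out : List String) (h : out.getLast? = some " ") :
    pvLoopA cs out = pvLoopA (cs.dropWhile PySem.Chars.isspace) out := by
  induction cs with
  | nil => simp
  | cons c cs ih =>
    by_cases hc : PySem.Chars.isspace c = true
    · have hne : out ≠ [] := by intro h0; rw [h0] at h; simp at h
      rw [pvLoopA]
      rw [if_pos hc, if_neg (by simp [hne, h])]
      rw [ih, List.dropWhile_cons_of_pos hc]
    · rw [List.dropWhile_cons, if_neg hc]

theorem pv_ofList_ne_space {l : List Char} (h : ∀ c ∈ l.head?, PySem.Chars.isspace c = false) :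
    String.ofList l ≠ " " := by
  intro he
  have : l = [' '] := String.ofList_inj.mp (he.trans (rfl : (" " : String) = String.ofList [' ']))
  rw [this] at h
  have := h ' ' (by simp)
  simp [PySem.Chars.isspace] at this

theorem pvLoopA_eq_tokB (n : Nat) : ∀ (cs : List Char) (out : List String), cs.length ≤ n →
    (out.getLast? = some " " → ∀ c ∈ cs.head?, PySem.Chars.isspace c = false) →
    pvLoopA cs out = out ++ pvTokB cs := by
  induction n with
  | zero =>
    intro cs out hlen _
    cases cs with
    | nil => rw [pvLoopA, pvTokB]; simp
    | cons a l => simp at hlen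
  | succ n ih =>
    intro cs out hlen hcond
    cases cs with
    | nil => rw [pvLoopA, pvTokB]; simp
    | cons c cs' =>
      have hlen' : cs'.length ≤ n := by simp at hlen; omega
      by_cases hs : PySem.Chars.isspace c = true
      · have hguard : out = [] ∨ out.getLast? ≠ some " " := by
          by_cases ho : out.getLast? = some " "
          · exact absurd hs (by simpa using hcond ho c (by simp))
          · exact Or.inr ho
        rw [pvLoopA, if_pos hs, if_pos hguard]
        rw [pvLoopA_skip cs' (out ++ [" "]) (by simp)]
        rw [ih (cs'.dropWhile PySem.Chars.isspace) (out ++ [" "])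
              (le_trans (List.length_dropWhile_le _ _) hlen')
              (fun _ d hd => pv_head_dropWhile _ cs' d hd)]
        rw [pvTokB_ws hs]
        simp
      · by_cases hw : pvIsAsciiWord c = true
        · rw [pvLoopA, if_neg (by simp [hs]), if_pos hw]
          rw [ih (cs'.dropWhile pvIsAsciiWord) _
                (le_trans (List.length_dropWhile_le _ _) hlen')
                (fun hlast => absurd (Option.some.inj ((List.getLast?_concat).symm.trans hlast))
                  (pv_ofList_ne_space (l := c :: cs'.takeWhile pvIsAsciiWord) (by simpa using hs)))]
          rw [pvTokB_word hw]
          simp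
        · rw [pvLoopA, if_neg (by simp [hs]), if_neg (by simp [hw])]
          rw [ih cs' _ hlen'
                (fun hlast => absurd (Option.some.inj ((List.getLast?_concat).symm.trans hlast))
                  (pv_ofList_ne_space (l := [c]) (by simpa using hs)))]
          rw [pvTokB_other (by simpa using hs) (by simpa using hw)]
          simp

theorem pvEnumFold (ps : List (List Char)) : ∀ (s : Int) (acc : List String), 0 < s →
    (PySem.List.enumerate ps s).foldl
      (fun toks ip => (if 0 < ip.1 then toks ++ [" "] else toks) ++ [String.ofList ip.2]) acc =
    acc ++ ps.flatMap (fun w => [" ", String.ofList w]) := by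
  induction ps with
  | nil => intro s acc _; simp [PySem.List.enumerate_nil]
  | cons q qs ih =>
    intro s acc hs
    rw [PySem.List.enumerate_cons, List.foldl_cons]
    simp only [if_pos hs]
    rw [ih (s + 1) _ (by omega)]
    simp

theorem split_branch_eq (parts : List (List Char)) :
    (PySem.List.enumerate parts 0).foldl
      (fun toks ip => (if 0 < ip.1 then toks ++ [" "] else toks) ++ [String.ofList ip.2]) [] =
    (parts.take 1).map String.ofList ++ (parts.drop 1).flatMap (fun w => [" ", String.ofList w]) := by
  cases parts with
  | nil => simp [PySem.List.enumerate_nil]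
  | cons p ps =>
    rw [PySem.List.enumerate_cons, List.foldl_cons]
    simp only [show ¬((0 : Int) < 0) by omega, if_false]
    rw [pvEnumFold ps (0 + 1) _ (by omega)]
    simp

-- ===== VERDICT (by name: the statement is the Claim_ definition above) =====
theorem tokenize_for_wrap_py_spec : Claim_equal_tokenize_for_wrap_py := by
  intro para _
  unfold Spec_tokenize_for_wrap_py tokenize_for_wrap_py tokenize_for_wrap_py_alt
  dsimp only
  split_ifs with h1 h2
  · rfl
  · have hf : (fun p : List Char => decide (p ≠ [])) = (fun p => !p.isEmpty) := by
      funext p; cases p <;> simp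
    rw [hf, split_branch_eq]
  · have := pvLoopA_eq_tokB para.toList.length para.toList [] le_rfl (by simp)
    simpa using this
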